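-- pv_equiv track=rewrite | github.com/vrushank-agrawal/Polytechnique_Courses | CSE102/td3sols/dpcoin.py | collusion_list
-- ===== SOURCE A (Python) =====
-- def collusion_list(A, B):
--     m = len(A)
--     n = len(B)
--     c = [[[] for _ in range(n+1)] for _ in range(m+1)]
--
--     for i in range(1,m+1):
--         for j in range(1,n+1):
--             if A[i-1] == B[j-1]:
--                 c[i][j] = c[i-1][j-1] + [(i-1,j-1)]
--             else:
--                 c[i][j] = max(c[i][j-1], c[i-1][j], key = lambda p : len(p))
--     return c[m][n]
-- ===== SOURCE B (Python) =====
-- def collusion_list(A, B):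
--     # O(m*n) integer-length DP (row list) + single backtrack, instead of A's list-valued table.
--     n = len(B)
--     rows = [[0] * (n + 1)]
--     for a in A:
--         prev = rows[-1]
--         cur = [0]
--         for j in range(1, n + 1):
--             if a == B[j - 1]:
--                 cur.append(prev[j - 1] + 1)
--             elif cur[j - 1] >= prev[j]:
--                 cur.append(cur[j - 1])
--             else:
--                 cur.append(prev[j])
--         rows.append(cur)
--     out = []
--     i, j = len(A), n
--     while i > 0 and j > 0:
--         if A[i - 1] == B[j - 1]:
--             out.append((i - 1, j - 1))
--             i -= 1
--             j -= 1
--         elif rows[i][j - 1] >= rows[i - 1][j]: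
--             j -= 1
--         else:
--             i -= 1
--     out.reverse()
--     return out
-- ===== Notes on version B (the rewrite author's own statement) =====
-- stated objective: faster
-- what changed: Replaced A's DP table that stores a full index-pair list in every cell (copied/compared cell-by-cell) with an integer-length DP over rows plus a single backtrack that rebuilds the one answer list, preferring the left move on ties exactly as Python's max(..., key=len) does.
import Mathlib
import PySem

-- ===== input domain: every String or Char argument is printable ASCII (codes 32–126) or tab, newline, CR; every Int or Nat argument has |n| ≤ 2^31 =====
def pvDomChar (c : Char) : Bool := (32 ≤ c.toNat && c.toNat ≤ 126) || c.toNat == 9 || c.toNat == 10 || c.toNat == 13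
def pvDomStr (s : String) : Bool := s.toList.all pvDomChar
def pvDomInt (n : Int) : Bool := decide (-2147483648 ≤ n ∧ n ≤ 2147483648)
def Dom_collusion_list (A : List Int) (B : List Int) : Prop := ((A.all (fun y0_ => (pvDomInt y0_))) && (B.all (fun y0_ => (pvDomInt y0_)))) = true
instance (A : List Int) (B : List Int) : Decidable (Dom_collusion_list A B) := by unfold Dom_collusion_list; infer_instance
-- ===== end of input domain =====

-- B replaces A's O(m·n·L) list-valued DP table by an O(m·n) integer-length DP plus a single
-- backtrack with the same left-on-tie preference (objective: faster, asymptotic).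

-- ===== PORT A =====
-- A's table c is a list of rows; Python's `max(x, y, key=len)` returns y iff len(y) > len(x).
abbrev PvTab := List (List (List (Int × Int)))

def pyMaxLen (x y : List (Int × Int)) : List (Int × Int) :=
  if y.length > x.length then y else x

-- the body of A's inner loop: value of cell c[i0+1][j0+1] (Python's c[i][j] with i=i0+1, j=j0+1)
def aCell (Al Bl : List Int) (c : PvTab) (i0 j0 : Nat) : List (Int × Int) :=
  if Al.getD i0 0 = Bl.getD j0 0 then
    ((c.getD i0 []).getD j0 []) ++ [((i0 : Int), (j0 : Int))]
  else
    pyMaxLen ((c.getD (i0+1) []).getD j0 []) ((c.getD i0 []).getD (j0+1) [])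

-- the in-place assignment c[i][j] = …
def aStep (Al Bl : List Int) (i0 : Nat) (c : PvTab) (j0 : Nat) : PvTab :=
  c.set (i0+1) ((c.getD (i0+1) []).set (j0+1) (aCell Al Bl c i0 j0))

-- `for j in range(1, n+1)` rendered as a fold over j0 = j-1 ∈ range n
def aRow (Al Bl : List Int) (c : PvTab) (i0 : Nat) : PvTab :=
  (List.range Bl.length).foldl (aStep Al Bl i0) c

-- `for i in range(1, m+1)` rendered as a fold over i0 = i-1 ∈ range m
def collusion_list (A : List Int) (B : List Int) : List (Int × Int) :=
  let m := A.length
  let n := B.length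
  let c0 : PvTab := (List.range (m+1)).map (fun _ => (List.range (n+1)).map (fun _ => ([] : List (Int × Int))))
  let c := (List.range m).foldl (fun c i0 => aRow A B c i0) c0
  (c.getD m []).getD n []

-- ===== PORT B =====
-- next row of the integer LCS-length DP from the previous row (B's inner loop, 1-based j = j0+1)
def bRowStep (Bl : List Int) (a : Int) (prev : List Int) : List Int :=
  (List.range Bl.length).foldl (fun cur j0 =>
    cur ++ [ if a = Bl.getD j0 0 then prev.getD j0 0 + 1
             else if cur.getD j0 0 ≥ prev.getD (j0+1) 0 then cur.getD j0 0
             else prev.getD (j0+1) 0 ]) [(0 : Int)]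

-- `rows` after the forward pass; `rows[-1]` is ported as getLast?.getD
def bRows (Al Bl : List Int) : List (List Int) :=
  Al.foldl (fun rows a => rows ++ [bRowStep Bl a (rows.getLast?.getD [])])
    [(List.range (Bl.length+1)).map (fun _ => (0 : Int))]

-- the backtracking while-loop (appends like the Python, reversed at the end)
def bBack (Al Bl : List Int) (rows : List (List Int)) : Nat → Nat → List (Int × Int) → List (Int × Int)
  | i0+1, j0+1, out =>
    if Al.getD i0 0 = Bl.getD j0 0 then
      bBack Al Bl rows i0 j0 (out ++ [((i0 : Int), (j0 : Int))])
    else if (rows.getD (i0+1) []).getD j0 0 ≥ (rows.getD i0 []).getD (j0+1) 0 then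
      bBack Al Bl rows (i0+1) j0 out
    else
      bBack Al Bl rows i0 (j0+1) out
  | 0, _, out => out
  | _+1, 0, out => out
termination_by i j _ => i + j

def collusion_list_alt (A : List Int) (B : List Int) : List (Int × Int) :=
  (bBack A B (bRows A B) A.length B.length []).reverse

-- ===== PRECONDITION & SPEC =====
def Spec_collusion_list (A : List Int) (B : List Int) (out : List (Int × Int)) : Prop := out = collusion_list_alt A B
instance (A : List Int) (B : List Int) (out : List (Int × Int)) : Decidable (Spec_collusion_list A B out) := by unfold Spec_collusion_list; infer_instance

-- ===== CLAIM (what is proved, stated in full; the proofs are below) =====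
def Claim_equal_collusion_list : Prop := ∀ (A : List Int) (B : List Int), Dom_collusion_list A B → Spec_collusion_list A B (collusion_list A B)

-- ===== LEMMAS AND PROOFS =====

-- the mathematical LCS list both ports compute: cF i j = Python's c[i][j]
def cF (Al Bl : List Int) : Nat → Nat → List (Int × Int)
  | 0, _ => []
  | _+1, 0 => []
  | i+1, j+1 =>
    if Al.getD i 0 = Bl.getD j 0 then cF Al Bl i j ++ [((i : Int), (j : Int))]
    else if (cF Al Bl i (j+1)).length > (cF Al Bl (i+1) j).length then cF Al Bl i (j+1)
    else cF Al Bl (i+1) j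
termination_by i j => i + j

-- integer length of cF
def lF (Al Bl : List Int) (i j : Nat) : Int := ((cF Al Bl i j).length : Int)

theorem lF_zero_left (Al Bl : List Int) (j : Nat) : lF Al Bl 0 j = 0 := by
  simp [lF, cF]

theorem lF_zero_right (Al Bl : List Int) (i : Nat) : lF Al Bl i 0 = 0 := by
  cases i <;> simp [lF, cF]

theorem lF_succ (Al Bl : List Int) (i j : Nat) :
    lF Al Bl (i+1) (j+1) =
      if Al.getD i 0 = Bl.getD j 0 then lF Al Bl i j + 1
      else if lF Al Bl (i+1) j ≥ lF Al Bl i (j+1) then lF Al Bl (i+1) j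
      else lF Al Bl i (j+1) := by
  rw [lF, cF]
  split_ifs <;> simp [lF] at * <;> omega

theorem getD_set_self {α : Type} (l : List α) (i : Nat) (x d : α) (h : i < l.length) :
    (l.set i x).getD i d = x := by
  simp [List.getD_eq_getElem?_getD, h]

theorem getD_set_ne {α : Type} (l : List α) (i j : Nat) (x d : α) (h : i ≠ j) :
    (l.set i x).getD j d = l.getD j d := by
  simp [List.getD_eq_getElem?_getD, List.getElem?_set_ne h]

theorem getD_map_range {α : Type} (f : Nat → α) (k j : Nat) (d : α) (h : j < k) :
    ((List.range k).map f).getD j d = f j := by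
  simp [List.getD_eq_getElem?_getD, h]

-- ---------- A side ----------

-- table entry
def tg (c : PvTab) (i j : Nat) : List (Int × Int) := (c.getD i []).getD j []

-- invariant inside the processing of row i0+1, after t inner steps
def InInv (Al Bl : List Int) (i0 t : Nat) (c : PvTab) : Prop :=
  c.length = Al.length + 1 ∧
  (∀ r, r < Al.length + 1 → (c.getD r []).length = Bl.length + 1) ∧
  (∀ r j, r ≤ i0 → j ≤ Bl.length → tg c r j = cF Al Bl r j) ∧
  (∀ j, j ≤ t → tg c (i0+1) j = cF Al Bl (i0+1) j) ∧
  (∀ j, t < j → tg c (i0+1) j = []) ∧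
  (∀ r j, i0+1 < r → tg c r j = [])

theorem tg_aStep (Al Bl : List Int) (i0 j0 : Nat) (c : PvTab) (r j : Nat)
    (hl : i0 + 1 < c.length) (hr : (c.getD (i0+1) []).length = Bl.length + 1)
    (hj : j0 + 1 < Bl.length + 1) :
    tg (aStep Al Bl i0 c j0) r j =
      if r = i0 + 1 ∧ j = j0 + 1 then aCell Al Bl c i0 j0 else tg c r j := by
  unfold aStep tg
  by_cases h1 : r = i0 + 1
  · subst h1
    rw [getD_set_self _ _ _ _ hl]
    by_cases h2 : j = j0 + 1
    · subst h2
      rw [getD_set_self _ _ _ _ (hr ▸ hj), if_pos ⟨rfl, rfl⟩]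
    · rw [getD_set_ne _ _ _ _ _ (fun h => h2 h.symm), if_neg (by rintro ⟨-, h⟩; exact h2 h)]
  · rw [getD_set_ne _ _ _ _ _ (fun h => h1 h.symm), if_neg (by rintro ⟨h, -⟩; exact h1 h)]

theorem aStep_correct (Al Bl : List Int) (i0 t : Nat) (c : PvTab)
    (hi : i0 < Al.length) (ht : t < Bl.length) (h : InInv Al Bl i0 t c) :
    InInv Al Bl i0 (t+1) (aStep Al Bl i0 c t) := by
  obtain ⟨h1, h2, h3, h4, h5, h6⟩ := h
  have hl : i0 + 1 < c.length := by omega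
  have hr : (c.getD (i0+1) []).length = Bl.length + 1 := h2 _ (by omega)
  have hjn : t + 1 < Bl.length + 1 := by omega
  have hcell : aCell Al Bl c i0 t = cF Al Bl (i0+1) (t+1) := by
    unfold aCell pyMaxLen
    have e1 : tg c i0 t = cF Al Bl i0 t := h3 i0 t (le_refl _) (by omega)
    have e2 : tg c i0 (t+1) = cF Al Bl i0 (t+1) := h3 i0 (t+1) (le_refl _) (by omega)
    have e3 : tg c (i0+1) t = cF Al Bl (i0+1) t := h4 t (le_refl _)
    unfold tg at e1 e2 e3
    rw [e1, e2, e3, cF]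
  refine ⟨by unfold aStep; simpa using h1, ?_, ?_, ?_, ?_, ?_⟩
  · intro r hrm
    unfold aStep
    by_cases h' : r = i0 + 1
    · subst h'; rw [getD_set_self _ _ _ _ hl]; simpa using hr
    · rw [getD_set_ne _ _ _ _ _ (fun h => h' h.symm)]; exact h2 r hrm
  · intro r j hri hj
    rw [tg_aStep Al Bl i0 t c r j hl hr hjn, if_neg (by rintro ⟨h', -⟩; omega)]
    exact h3 r j hri hj
  · intro j hj
    rw [tg_aStep Al Bl i0 t c _ j hl hr hjn]
    by_cases h' : j = t + 1
    · subst h'; rw [if_pos ⟨rfl, rfl⟩, hcell]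
    · rw [if_neg (by rintro ⟨-, h''⟩; exact h' h'')]
      exact h4 j (by omega)
  · intro j hj
    rw [tg_aStep Al Bl i0 t c _ j hl hr hjn, if_neg (by rintro ⟨-, h''⟩; omega)]
    exact h5 j (by omega)
  · intro r j hrr
    rw [tg_aStep Al Bl i0 t c r j hl hr hjn, if_neg (by rintro ⟨h'', -⟩; omega)]
    exact h6 r j hrr

theorem aRow_fold (Al Bl : List Int) (i0 : Nat) (c : PvTab) (hi : i0 < Al.length)
    (h : InInv Al Bl i0 0 c) :
    ∀ t, t ≤ Bl.length → InInv Al Bl i0 t ((List.range t).foldl (aStep Al Bl i0) c)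
  | 0, _ => by simpa using h
  | t+1, ht => by
    rw [List.range_succ, List.foldl_append, List.foldl_cons, List.foldl_nil]
    exact aStep_correct Al Bl i0 t _ hi (by omega) (aRow_fold Al Bl i0 c hi h t (by omega))

-- invariant between outer iterations: rows 1..k done
def OutInv (Al Bl : List Int) (k : Nat) (c : PvTab) : Prop :=
  c.length = Al.length + 1 ∧
  (∀ r, r < Al.length + 1 → (c.getD r []).length = Bl.length + 1) ∧
  (∀ r j, r ≤ k → j ≤ Bl.length → tg c r j = cF Al Bl r j) ∧
  (∀ r j, k < r → tg c r j = [])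

theorem aRow_correct (Al Bl : List Int) (k : Nat) (c : PvTab) (hk : k < Al.length)
    (h : OutInv Al Bl k c) : OutInv Al Bl (k+1) (aRow Al Bl c k) := by
  obtain ⟨h1, h2, h3, h4⟩ := h
  have hin : InInv Al Bl k 0 c := by
    refine ⟨h1, h2, h3, ?_, ?_, ?_⟩
    · intro j hj
      have hj0 : j = 0 := by omega
      subst hj0
      rw [h4 (k+1) 0 (by omega)]
      cases k <;> rw [cF]
    · intro j hj; exact h4 (k+1) j (by omega)
    · intro r j hr; exact h4 r j (by omega)
  obtain ⟨g1, g2, g3, g4, g5, g6⟩ := aRow_fold Al Bl k c hk hin Bl.length (le_refl _)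
  refine ⟨g1, g2, ?_, ?_⟩
  · intro r j hr hj
    by_cases h' : r = k + 1
    · subst h'; exact g4 j hj
    · exact g3 r j (by omega) hj
  · intro r j hr; exact g6 r j (by omega)

theorem outer_fold (Al Bl : List Int) (c0 : PvTab) (h0 : OutInv Al Bl 0 c0) :
    ∀ k, k ≤ Al.length →
      OutInv Al Bl k ((List.range k).foldl (fun c i0 => aRow Al Bl c i0) c0)
  | 0, _ => by simpa using h0
  | k+1, hk => by
    rw [List.range_succ, List.foldl_append, List.foldl_cons, List.foldl_nil]
    exact aRow_correct Al Bl k _ (by omega) (outer_fold Al Bl c0 h0 k (by omega))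

theorem init_tab (Al Bl : List Int) :
    OutInv Al Bl 0
      ((List.range (Al.length+1)).map (fun _ => (List.range (Bl.length+1)).map (fun _ => ([] : List (Int × Int))))) := by
  have hempty : ∀ r j, tg ((List.range (Al.length+1)).map (fun _ => (List.range (Bl.length+1)).map (fun _ => ([] : List (Int × Int))))) r j = [] := by
    intro r j
    unfold tg
    by_cases hr : r < Al.length + 1
    · rw [getD_map_range _ _ _ _ hr]
      by_cases hj : j < Bl.length + 1
      · rw [getD_map_range _ _ _ _ hj]
      · exact List.getD_eq_default _ _ (by simp; omega)
    · have houter : ((List.range (Al.length+1)).map (fun _ => (List.range (Bl.length+1)).map (fun _ => ([] : List (Int × Int))))).getD r [] = [] :=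
        List.getD_eq_default _ _ (by simp; omega)
      rw [houter]
      exact List.getD_eq_default _ _ (by simp)
  refine ⟨by simp, ?_, ?_, ?_⟩
  · intro r hr; rw [getD_map_range _ _ _ _ hr]; simp
  · intro r j hr hj
    have hr0 : r = 0 := by omega
    subst hr0
    rw [hempty 0 j, cF]
  · intro r j _; exact hempty r j

theorem collusion_list_eq_cF (Al Bl : List Int) :
    collusion_list Al Bl = cF Al Bl Al.length Bl.length := by
  unfold collusion_list
  obtain ⟨h1, h2, h3, h4⟩ :=
    outer_fold Al Bl _ (init_tab Al Bl) Al.length (le_refl _)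
  exact h3 Al.length Bl.length (le_refl _) (le_refl _)

-- ---------- B side ----------

theorem bRowStep_fold (Al Bl : List Int) (i : Nat) (prev : List Int)
    (hp : ∀ j, j ≤ Bl.length → prev.getD j 0 = lF Al Bl i j) :
    ∀ t, t ≤ Bl.length →
      (List.range t).foldl (fun cur j0 =>
        cur ++ [ if Al.getD i 0 = Bl.getD j0 0 then prev.getD j0 0 + 1
                 else if cur.getD j0 0 ≥ prev.getD (j0+1) 0 then cur.getD j0 0
                 else prev.getD (j0+1) 0 ]) [(0 : Int)]
      = (List.range (t+1)).map (fun j => lF Al Bl (i+1) j) := by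
  intro t
  induction t with
  | zero => intro _; simp [lF_zero_right]
  | succ t ih =>
    intro ht
    rw [List.range_succ (n := t), List.foldl_append, ih (by omega), List.foldl_cons, List.foldl_nil]
    rw [getD_map_range _ _ _ _ (by omega : t < t + 1)]
    rw [hp t (by omega), hp (t+1) (by omega)]
    rw [List.range_succ (n := t+1), List.map_append]
    congr 1
    simp only [List.map_cons, List.map_nil, List.cons.injEq, and_true]
    rw [lF_succ]

theorem bRows_eq (Al Bl : List Int) :
    bRows Al Bl = (List.range (Al.length+1)).map (fun i => (List.range (Bl.length+1)).map (fun j => lF Al Bl i j)) := by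
  unfold bRows
  suffices h : ∀ k, k ≤ Al.length →
      (Al.take k).foldl (fun rows a => rows ++ [bRowStep Bl a (rows.getLast?.getD [])])
        [(List.range (Bl.length+1)).map (fun _ => (0 : Int))]
      = (List.range (k+1)).map (fun i => (List.range (Bl.length+1)).map (fun j => lF Al Bl i j)) by
    have hfin := h Al.length (le_refl _)
    rwa [List.take_length] at hfin
  intro k
  induction k with
  | zero => intro _; simp [lF_zero_left]
  | succ k ih =>
    intro hk
    have htake : Al.take (k+1) = Al.take k ++ [Al.getD k 0] := by
      rw [List.take_add_one]
      congr 1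
      rw [List.getElem?_eq_getElem (by omega), List.getD_eq_getElem _ _ (by omega)]
      simp
    rw [htake, List.foldl_append, ih (by omega), List.foldl_cons, List.foldl_nil]
    have hlast : ((List.range (k+1)).map (fun i => (List.range (Bl.length+1)).map (fun j => lF Al Bl i j))).getLast?.getD []
        = (List.range (Bl.length+1)).map (fun j => lF Al Bl k j) := by
      rw [List.getLast?_eq_getElem?]
      simp
    rw [hlast]
    have hrow : bRowStep Bl (Al.getD k 0) ((List.range (Bl.length+1)).map (fun j => lF Al Bl k j))
        = (List.range (Bl.length+1)).map (fun j => lF Al Bl (k+1) j) := by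
      unfold bRowStep
      exact bRowStep_fold Al Bl k _ (fun j hj => getD_map_range _ _ _ _ (by omega)) Bl.length (le_refl _)
    rw [hrow, List.range_succ (n := k+1), List.map_append]
    simp

theorem bBack_eq (Al Bl : List Int) :
    ∀ i j, i ≤ Al.length → j ≤ Bl.length → ∀ out,
      bBack Al Bl (bRows Al Bl) i j out = out ++ (cF Al Bl i j).reverse
  | 0, j, _, _, out => by rw [bBack, cF]; simp
  | i+1, 0, _, _, out => by rw [bBack, cF]; simp
  | i+1, j+1, hi, hj, out => by
    rw [bBack]
    have e1 : ((bRows Al Bl).getD (i+1) []).getD j 0 = lF Al Bl (i+1) j := by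
      rw [bRows_eq, getD_map_range _ _ _ _ (by omega), getD_map_range _ _ _ _ (by omega)]
    have e2 : ((bRows Al Bl).getD i []).getD (j+1) 0 = lF Al Bl i (j+1) := by
      rw [bRows_eq, getD_map_range _ _ _ _ (by omega), getD_map_range _ _ _ _ (by omega)]
    by_cases hab : Al.getD i 0 = Bl.getD j 0
    · rw [if_pos hab, bBack_eq Al Bl i j (by omega) (by omega), cF, if_pos hab]
      simp
    · rw [if_neg hab, e1, e2, cF, if_neg hab]
      by_cases hge : lF Al Bl (i+1) j ≥ lF Al Bl i (j+1)
      · rw [if_pos hge, bBack_eq Al Bl (i+1) j (by omega) (by omega),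
          if_neg (by simp only [lF] at hge; omega)]
      · rw [if_neg hge, bBack_eq Al Bl i (j+1) (by omega) (by omega),
          if_pos (by simp only [lF, ge_iff_le, Int.ofNat_le, not_le] at hge; omega)]
termination_by i j => i + j

theorem collusion_list_alt_eq_cF (Al Bl : List Int) :
    collusion_list_alt Al Bl = cF Al Bl Al.length Bl.length := by
  unfold collusion_list_alt
  rw [bBack_eq Al Bl Al.length Bl.length (le_refl _) (le_refl _) []]
  simp

-- ===== VERDICT (by name: the statement is the Claim_ definition above) =====
theorem collusion_list_spec : Claim_equal_collusion_list := by
  intro A B _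
  unfold Spec_collusion_list
  rw [collusion_list_eq_cF, collusion_list_alt_eq_cF]
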